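-- pv_equiv track=rewrite | github.com/shizzka/job-hunter | agent.py | _format_stats_source_breakdown
-- ===== SOURCE A (Python) =====
-- SOURCE_ORDER = ("hh", "habr", "geekjob", "superjob")
--
-- SOURCE_LABELS = {
--     "hh": "hh.ru",
--     "habr": "Хабр",
--     "geekjob": "GeekJob",
--     "superjob": "SuperJob",
--     "unknown": "unknown",
-- }
--
-- SOURCE_SHORT_LABELS = {
--     "hh": "hh",
--     "habr": "Хабр",
--     "geekjob": "GJ",
--     "superjob": "SJ",
--     "unknown": "?",
-- }
--
-- def _source_label(source: str, short: bool = False) -> str: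
--     labels = SOURCE_SHORT_LABELS if short else SOURCE_LABELS
--     return labels.get(source, source)
--
-- def _format_stats_source_breakdown(by_source: dict) -> list[str]:
--     lines = []
--     for source in SOURCE_ORDER:
--         bucket = by_source.get(source)
--         if not bucket:
--             continue
--         lines.append(
--             "  "
--             f"{_source_label(source):<10} total {bucket.get('total', 0):>4} | "
--             f"applied {bucket.get('applied', 0):>3} | "
--             f"manual {bucket.get('manual', 0):>3} | "
--             f"skipped {bucket.get('skipped', 0):>3}"
--         )
--
--     for source, bucket in by_source.items():
--         if source in SOURCE_ORDER:
--             continue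
--         lines.append(
--             "  "
--             f"{source:<10} total {bucket.get('total', 0):>4} | "
--             f"applied {bucket.get('applied', 0):>3} | "
--             f"manual {bucket.get('manual', 0):>3} | "
--             f"skipped {bucket.get('skipped', 0):>3}"
--         )
--
--     return lines
-- ===== SOURCE B (Python) =====
-- SOURCE_ORDER = ("hh", "habr", "geekjob", "superjob")
--
-- SOURCE_LABELS = {
--     "hh": "hh.ru",
--     "habr": "Хабр",
--     "geekjob": "GeekJob",
--     "superjob": "SuperJob",
--     "unknown": "unknown",
-- }
--
-- SOURCE_SHORT_LABELS = {
--     "hh": "hh",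
--     "habr": "Хабр",
--     "geekjob": "GJ",
--     "superjob": "SJ",
--     "unknown": "?",
-- }
--
-- def _source_label(source: str, short: bool = False) -> str:
--     labels = SOURCE_SHORT_LABELS if short else SOURCE_LABELS
--     return labels.get(source, source)
--
-- def _fmt_row(label: str, bucket: dict) -> str:
--     return (
--         "  "
--         f"{label:<10} total {bucket.get('total', 0):>4} | "
--         f"applied {bucket.get('applied', 0):>3} | "
--         f"manual {bucket.get('manual', 0):>3} | "
--         f"skipped {bucket.get('skipped', 0):>3}"
--     )
--
-- def _format_stats_source_breakdown(by_source: dict) -> list[str]: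
--     # Single pass over by_source: a known source drops its formatted line into its
--     # fixed SOURCE_ORDER slot (skipped if the bucket is falsy), any other source
--     # appends to the tail; the slots are then emitted ahead of the tail.
--     rank = {s: i for i, s in enumerate(SOURCE_ORDER)}
--     head = [None] * len(SOURCE_ORDER)
--     tail = []
--     for source, bucket in by_source.items():
--         i = rank.get(source)
--         if i is None:
--             tail.append(_fmt_row(source, bucket))
--         elif bucket:
--             head[i] = _fmt_row(_source_label(source), bucket)
--     return [line for line in head if line is not None] + tail
-- ===== Notes on version B (the rewrite author's own statement) =====
-- stated objective: alternative
-- what changed: B replaces A's two formatting loops (a pass over SOURCE_ORDER doing a dict lookup per key, then a pass over by_source skipping known keys) by ONE pass over by_source that drops each known source's formatted line into a fixed SOURCE_ORDER slot array via a rank index and appends unknown sources to a tail, emitting filled slots then tail.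
import Mathlib
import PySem

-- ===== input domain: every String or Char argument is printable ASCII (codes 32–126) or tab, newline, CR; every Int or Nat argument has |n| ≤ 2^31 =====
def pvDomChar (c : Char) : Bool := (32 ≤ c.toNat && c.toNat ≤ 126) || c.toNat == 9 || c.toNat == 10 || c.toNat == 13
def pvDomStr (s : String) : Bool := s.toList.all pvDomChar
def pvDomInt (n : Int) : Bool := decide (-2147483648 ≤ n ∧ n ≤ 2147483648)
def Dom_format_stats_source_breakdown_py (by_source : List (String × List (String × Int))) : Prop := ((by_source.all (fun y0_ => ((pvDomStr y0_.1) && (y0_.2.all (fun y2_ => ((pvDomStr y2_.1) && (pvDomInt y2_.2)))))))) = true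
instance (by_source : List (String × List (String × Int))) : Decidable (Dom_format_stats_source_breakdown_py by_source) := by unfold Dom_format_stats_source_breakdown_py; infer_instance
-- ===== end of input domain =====

-- B replaces A's two formatting loops by ONE pass over by_source that drops each known
-- source's line into its fixed SOURCE_ORDER slot and appends unknown sources to a tail
-- (objective: alternative single-pass algorithm, no speed claim).

-- ===== PORT A =====
-- shared module constants (A and B come from the same module)
def SOURCE_ORDER_py : List String := ["hh", "habr", "geekjob", "superjob"]
def SOURCE_LABELS_py : PySem.Dict String String :=
  PySem.Dict.mk [("hh", "hh.ru"), ("habr", "Хабр"), ("geekjob", "GeekJob"),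
                 ("superjob", "SuperJob"), ("unknown", "unknown")]
def SOURCE_SHORT_LABELS_py : PySem.Dict String String :=
  PySem.Dict.mk [("hh", "hh"), ("habr", "Хабр"), ("geekjob", "GJ"),
                 ("superjob", "SJ"), ("unknown", "?")]
-- _source_label (a module helper both A and B call)
def source_label_py (source : String) (short : Bool) : String :=
  (if short then SOURCE_SHORT_LABELS_py else SOURCE_LABELS_py).getD source source
-- f"{s:<10}" — left-justify with spaces (Python pads by character count)
def pvLJust (s : String) (w : Nat) : String :=
  String.ofList (s.toList ++ List.replicate (w - s.toList.length) ' ')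
-- f"{n:>4}" for an int — str(n) right-justified with spaces
def pvRJustInt (n : Int) (w : Nat) : String :=
  String.ofList (List.replicate (w - (PySem.Int.toChars n).length) ' ' ++ PySem.Int.toChars n)

def format_stats_source_breakdown_py (by_source : List (String × List (String × Int))) : List String :=
  -- first loop: for source in SOURCE_ORDER, skipping falsy (missing or empty) buckets
  let lines : List String := SOURCE_ORDER_py.foldl (fun lines source =>
    match (PySem.Dict.mk by_source).get? source with
    | none => lines
    | some bucket =>
      if bucket = [] then lines
      else lines ++ ["  " ++ pvLJust (source_label_py source false) 10
        ++ " total " ++ pvRJustInt ((PySem.Dict.mk bucket).getD "total" 0) 4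
        ++ " | applied " ++ pvRJustInt ((PySem.Dict.mk bucket).getD "applied" 0) 3
        ++ " | manual " ++ pvRJustInt ((PySem.Dict.mk bucket).getD "manual" 0) 3
        ++ " | skipped " ++ pvRJustInt ((PySem.Dict.mk bucket).getD "skipped" 0) 3]) []
  -- second loop: for source, bucket in by_source.items(), skipping SOURCE_ORDER keys
  by_source.foldl (fun lines p =>
    if SOURCE_ORDER_py.contains p.1 then lines
    else lines ++ ["  " ++ pvLJust p.1 10
      ++ " total " ++ pvRJustInt ((PySem.Dict.mk p.2).getD "total" 0) 4
      ++ " | applied " ++ pvRJustInt ((PySem.Dict.mk p.2).getD "applied" 0) 3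
      ++ " | manual " ++ pvRJustInt ((PySem.Dict.mk p.2).getD "manual" 0) 3
      ++ " | skipped " ++ pvRJustInt ((PySem.Dict.mk p.2).getD "skipped" 0) 3]) lines

-- ===== PORT B =====
-- _fmt_row: B's single shared format helper
def fmt_row_py (label : String) (bucket : List (String × Int)) : String :=
  "  " ++ pvLJust label 10
    ++ " total " ++ pvRJustInt ((PySem.Dict.mk bucket).getD "total" 0) 4
    ++ " | applied " ++ pvRJustInt ((PySem.Dict.mk bucket).getD "applied" 0) 3
    ++ " | manual " ++ pvRJustInt ((PySem.Dict.mk bucket).getD "manual" 0) 3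
    ++ " | skipped " ++ pvRJustInt ((PySem.Dict.mk bucket).getD "skipped" 0) 3

-- rank = {s: i for i, s in enumerate(SOURCE_ORDER)}
def rank_py : PySem.Dict String Int :=
  PySem.Dict.mk ((PySem.List.enumerate SOURCE_ORDER_py 0).map (fun p => (p.2, p.1)))

def format_stats_source_breakdown_py_alt (by_source : List (String × List (String × Int))) : List String :=
  -- single pass: state = (head slots, tail); i = rank.get(source) (i ≥ 0 always, so .toNat is exact)
  let st : List (Option String) × List String :=
    by_source.foldl (fun st p =>
      match rank_py.get? p.1 with
      | none => (st.1, st.2 ++ [fmt_row_py p.1 p.2])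
      | some i =>
        if p.2 = [] then st
        else (st.1.set i.toNat (some (fmt_row_py (source_label_py p.1 false) p.2)), st.2))
      (List.replicate SOURCE_ORDER_py.length none, [])
  st.1.filterMap id ++ st.2

-- ===== PRECONDITION & SPEC =====
-- Pre_ excludes association lists with DUPLICATE keys: those do not represent any Python
-- dict (Python collapses duplicates before the call), and which occurrence an assoc-list
-- convention reads there is accidental.
def Pre_format_stats_source_breakdown_py (by_source : List (String × List (String × Int))) : Prop :=
  (by_source.map Prod.fst).Nodup
instance (by_source : List (String × List (String × Int))) : Decidable (Pre_format_stats_source_breakdown_py by_source) := by unfold Pre_format_stats_source_breakdown_py; infer_instance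

def pvWitness_format_stats_source_breakdown_py : (List (String × List (String × Int))) :=
  [("hh", [("total", 3), ("applied", 1)]), ("avito", [("total", 2)]), ("habr", [])]

def Spec_format_stats_source_breakdown_py (by_source : List (String × List (String × Int))) (out : List String) : Prop := out = format_stats_source_breakdown_py_alt by_source
instance (by_source : List (String × List (String × Int))) (out : List String) : Decidable (Spec_format_stats_source_breakdown_py by_source out) := by unfold Spec_format_stats_source_breakdown_py; infer_instance

-- ===== CLAIM (what is proved, stated in full; the proofs are below) =====
def Claim_equal_format_stats_source_breakdown_py : Prop := ∀ (by_source : List (String × List (String × Int))), Dom_format_stats_source_breakdown_py by_source → Pre_format_stats_source_breakdown_py by_source → Spec_format_stats_source_breakdown_py by_source (format_stats_source_breakdown_py by_source)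

-- ===== LEMMAS AND PROOFS =====

-- what a SOURCE_ORDER slot holds at the end of B's pass (x = its previous content)
def pvQSlot (bs : List (String × List (String × Int))) (s : String) (x : Option String) : Option String :=
  match (PySem.Dict.mk bs).get? s with
  | some b => if b = [] then x else some (fmt_row_py (source_label_py s false) b)
  | none => x

theorem rank_get (s : String) :
    rank_py.get? s = if s = "hh" then some 0 else if s = "habr" then some 1
      else if s = "geekjob" then some 2 else if s = "superjob" then some 3 else none := by
  have h : rank_py = PySem.Dict.mk [("hh", 0), ("habr", 1), ("geekjob", 2), ("superjob", 3)] := rfl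
  rw [h]
  simp only [PySem.Dict.get?_mk_cons]
  by_cases h1 : s = "hh"
  · simp [h1]
  · have g1 : ("hh" == s) = false := by simp; exact fun e => h1 e.symm
    by_cases h2 : s = "habr"
    · simp [g1, h2]
    · have g2 : ("habr" == s) = false := by simp; exact fun e => h2 e.symm
      by_cases h3 : s = "geekjob"
      · simp [g1, g2, h3]
      · have g3 : ("geekjob" == s) = false := by simp; exact fun e => h3 e.symm
        by_cases h4 : s = "superjob"
        · simp [g1, g2, g3, h4]
        · have g4 : ("superjob" == s) = false := by simp; exact fun e => h4 e.symm
          simp [g1, g2, g3, g4, h1, h2, h3, h4, PySem.Dict.get?]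
theorem fold_head (bs : List (String × List (String × Int))) :
    (bs.map Prod.fst).Nodup →
    ∀ (a b c d : Option String),
      bs.foldl (fun h (p : String × List (String × Int)) =>
          match rank_py.get? p.1 with
          | none => h
          | some i =>
            if p.2 = [] then h
            else h.set i.toNat (some (fmt_row_py (source_label_py p.1 false) p.2))) [a, b, c, d]
      = [pvQSlot bs "hh" a, pvQSlot bs "habr" b, pvQSlot bs "geekjob" c, pvQSlot bs "superjob" d] := by
  induction bs with
  | nil => intro _ a b c d; simp [pvQSlot, PySem.Dict.get?]
  | cons p bs ih =>
    rintro hnd a b c d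
    obtain ⟨k, v⟩ := p
    simp only [List.map_cons, List.nodup_cons, List.mem_map] at hnd
    obtain ⟨hnotin, hnd'⟩ := hnd
    have hnone : (PySem.Dict.mk bs).get? k = none := by
      rw [PySem.Dict.get?_eq_none_iff_not_mem_keys]
      simp only [PySem.Dict.keys_mk]
      intro hmem
      rcases List.mem_map.mp hmem with ⟨q, hq, hq1⟩
      exact hnotin ⟨q, hq, hq1⟩
    by_cases h1 : k = "hh"
    · subst h1
      by_cases hb : v = [] <;>
        simp only [List.foldl_cons, show rank_py.get? "hh" = some 0 from rfl, reduceIte, hb,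
          show ((0 : Int).toNat) = 0 from rfl, List.set_cons_zero, List.set_cons_succ] <;>
        rw [ih hnd'] <;>
        simp [pvQSlot, PySem.Dict.get?_mk_cons, hnone, hb]
    · by_cases h2 : k = "habr"
      · subst h2
        by_cases hb : v = [] <;>
          simp only [List.foldl_cons, show rank_py.get? "habr" = some 1 from rfl, reduceIte, hb,
            show ((1 : Int).toNat) = 1 from rfl, List.set_cons_zero, List.set_cons_succ] <;>
          rw [ih hnd'] <;>
          simp [pvQSlot, PySem.Dict.get?_mk_cons, hnone, hb]
      · by_cases h3 : k = "geekjob"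
        · subst h3
          by_cases hb : v = [] <;>
            simp only [List.foldl_cons, show rank_py.get? "geekjob" = some 2 from rfl, reduceIte, hb,
              show ((2 : Int).toNat) = 2 from rfl, List.set_cons_zero, List.set_cons_succ] <;>
            rw [ih hnd'] <;>
            simp [pvQSlot, PySem.Dict.get?_mk_cons, hnone, hb]
        · by_cases h4 : k = "superjob"
          · subst h4
            by_cases hb : v = [] <;>
              simp only [List.foldl_cons, show rank_py.get? "superjob" = some 3 from rfl, reduceIte, hb,
                show ((3 : Int).toNat) = 3 from rfl, List.set_cons_zero, List.set_cons_succ] <;>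
              rw [ih hnd'] <;>
              simp [pvQSlot, PySem.Dict.get?_mk_cons, hnone, hb]
          · have hk : rank_py.get? k = none := by
              rw [rank_get]; simp [h1, h2, h3, h4]
            simp only [List.foldl_cons, hk]
            rw [ih hnd']
            have gk : ∀ s : String, s ≠ k → (PySem.Dict.mk ((k, v) :: bs)).get? s = (PySem.Dict.mk bs).get? s := by
              intro s hs
              rw [PySem.Dict.get?_mk_cons]
              simp [show (k == s) = false by simp; exact fun e => hs e.symm]
            simp [pvQSlot, gk "hh" (fun e => h1 e.symm), gk "habr" (fun e => h2 e.symm),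
              gk "geekjob" (fun e => h3 e.symm), gk "superjob" (fun e => h4 e.symm)]

-- rank.get(source) is Some exactly on the SOURCE_ORDER keys A tests with 'in'
theorem rank_isSome (s : String) :
    (rank_py.get? s).isSome = SOURCE_ORDER_py.contains s := by
  rw [rank_get s]
  by_cases h1 : s = "hh" <;> by_cases h2 : s = "habr" <;> by_cases h3 : s = "geekjob" <;>
    by_cases h4 : s = "superjob" <;> simp [SOURCE_ORDER_py, h1, h2, h3, h4]

-- B's pass, split: the tail collects the non-SOURCE_ORDER rows in order
theorem fold_snd (bs : List (String × List (String × Int))) :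
    ∀ (h : List (Option String)) (t : List String),
      (bs.foldl (fun st (p : String × List (String × Int)) =>
        match rank_py.get? p.1 with
        | none => (st.1, st.2 ++ [fmt_row_py p.1 p.2])
        | some i =>
          if p.2 = [] then st
          else (st.1.set i.toNat (some (fmt_row_py (source_label_py p.1 false) p.2)), st.2)) (h, t)).2
      = t ++ bs.filterMap (fun p => match rank_py.get? p.1 with
          | none => some (fmt_row_py p.1 p.2) | some _ => none) := by
  induction bs with
  | nil => intro h t; simp
  | cons p bs ih =>
    intro h t
    cases hr : rank_py.get? p.1 with
    | none => simp [List.foldl_cons, hr, ih]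
    | some i => by_cases hb : p.2 = [] <;> simp [List.foldl_cons, hr, hb, ih]

-- B's pass, split: the head component only sees the head updates
theorem fold_fst (bs : List (String × List (String × Int))) :
    ∀ (h : List (Option String)) (t : List String),
      (bs.foldl (fun st (p : String × List (String × Int)) =>
        match rank_py.get? p.1 with
        | none => (st.1, st.2 ++ [fmt_row_py p.1 p.2])
        | some i =>
          if p.2 = [] then st
          else (st.1.set i.toNat (some (fmt_row_py (source_label_py p.1 false) p.2)), st.2)) (h, t)).1
      = bs.foldl (fun h (p : String × List (String × Int)) =>
          match rank_py.get? p.1 with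
          | none => h
          | some i =>
            if p.2 = [] then h
            else h.set i.toNat (some (fmt_row_py (source_label_py p.1 false) p.2))) h := by
  induction bs with
  | nil => intro h t; simp
  | cons p bs ih =>
    intro h t
    cases hr : rank_py.get? p.1 with
    | none => simp [List.foldl_cons, hr, ih]
    | some i => by_cases hb : p.2 = [] <;> simp [List.foldl_cons, hr, hb, ih]

-- A's first loop produces exactly the (filtered) slot values, in SOURCE_ORDER
theorem loop1_eq (bs : List (String × List (String × Int))) :
    ∀ (l : List String) (acc : List String),
      l.foldl (fun lines source =>
        match (PySem.Dict.mk bs).get? source with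
        | none => lines
        | some bucket =>
          if bucket = [] then lines
          else lines ++ [fmt_row_py (source_label_py source false) bucket]) acc
      = acc ++ (l.map (fun s => pvQSlot bs s none)).filterMap id := by
  intro l
  induction l with
  | nil => intro acc; simp
  | cons s t ih =>
    intro acc
    cases hg : (PySem.Dict.mk bs).get? s with
    | none => simp [List.foldl_cons, hg, ih, pvQSlot]
    | some b => by_cases hb : b = [] <;> simp [List.foldl_cons, hg, hb, ih, pvQSlot]

-- A's second loop equals B's tail, appended to whatever the first loop produced
theorem loop2_eq (bs : List (String × List (String × Int))) :
    ∀ (acc : List String),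
      bs.foldl (fun lines (p : String × List (String × Int)) =>
        if SOURCE_ORDER_py.contains p.1 then lines
        else lines ++ [fmt_row_py p.1 p.2]) acc
      = acc ++ bs.filterMap (fun p => match rank_py.get? p.1 with
          | none => some (fmt_row_py p.1 p.2) | some _ => none) := by
  induction bs with
  | nil => intro acc; simp
  | cons p t ih =>
    intro acc
    cases hr : rank_py.get? p.1 with
    | none =>
      have hc : SOURCE_ORDER_py.contains p.1 = false := by
        have h := rank_isSome p.1; rw [hr] at h; exact h.symm
      simp only [List.foldl_cons, List.filterMap_cons, hr, hc, Bool.false_eq_true, reduceIte]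
      rw [ih]; simp
    | some i =>
      have hc : SOURCE_ORDER_py.contains p.1 = true := by
        have h := rank_isSome p.1; rw [hr] at h; exact h.symm
      simp only [List.foldl_cons, List.filterMap_cons, hr, hc, reduceIte]
      exact ih acc

-- ===== VERDICT (by name: the statement is the Claim_ definition above) =====
theorem format_stats_source_breakdown_py_spec : Claim_equal_format_stats_source_breakdown_py := by
  intro bs _ hpre
  show format_stats_source_breakdown_py bs = format_stats_source_breakdown_py_alt bs
  have hA : format_stats_source_breakdown_py bs =
      bs.foldl (fun lines (p : String × List (String × Int)) =>
          if SOURCE_ORDER_py.contains p.1 then lines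
          else lines ++ [fmt_row_py p.1 p.2])
        (SOURCE_ORDER_py.foldl (fun lines source =>
          match (PySem.Dict.mk bs).get? source with
          | none => lines
          | some bucket =>
            if bucket = [] then lines
            else lines ++ [fmt_row_py (source_label_py source false) bucket]) []) := rfl
  have hB : format_stats_source_breakdown_py_alt bs =
      (bs.foldl (fun st (p : String × List (String × Int)) =>
        match rank_py.get? p.1 with
        | none => (st.1, st.2 ++ [fmt_row_py p.1 p.2])
        | some i =>
          if p.2 = [] then st
          else (st.1.set i.toNat (some (fmt_row_py (source_label_py p.1 false) p.2)), st.2))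
        ([none, none, none, none], [])).1.filterMap id
      ++ (bs.foldl (fun st (p : String × List (String × Int)) =>
        match rank_py.get? p.1 with
        | none => (st.1, st.2 ++ [fmt_row_py p.1 p.2])
        | some i =>
          if p.2 = [] then st
          else (st.1.set i.toNat (some (fmt_row_py (source_label_py p.1 false) p.2)), st.2))
        ([none, none, none, none], [])).2 := rfl
  rw [hA, loop1_eq bs SOURCE_ORDER_py [], loop2_eq bs, hB, fold_snd bs, fold_fst bs,
      fold_head bs hpre]
  simp only [SOURCE_ORDER_py, List.map_cons, List.map_nil]
  rfl
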